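-- pv_equiv track=rewrite | github.com/tnotesjs/TNotes.leetcode | notes/1947. 最大兼容性评分和【中等】/solutions/1/1.py | maxCompatibilitySum
-- ===== SOURCE A (Python) =====
-- def maxCompatibilitySum(students: list[list[int]], mentors: list[list[int]]) -> int:
--     m = len(students)
--     n = 1 << m
--     dp = [-1] * n
--     dp[0] = 0
--     for mask in range(n):
--         if dp[mask] == -1:
--             continue
--         i = bin(mask).count('1')
--         if i >= m:
--             continue
--         for j in range(m):
--             if mask & (1 << j):
--                 continue
--             sc = sum(s == t for s, t in zip(students[i], mentors[j]))
--             nxt = mask | (1 << j)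
--             dp[nxt] = max(dp[nxt], dp[mask] + sc)
--     return dp[n - 1]
-- ===== SOURCE B (Python) =====
-- def maxCompatibilitySum(students: list[list[int]], mentors: list[list[int]]) -> int:
--     m = len(students)
--     free = [True] * m
--
--     def assign(k):
--         # best total for students[0:k] matched against the currently free mentors
--         if k == 0:
--             return 0
--         best = None
--         for j in range(m):
--             if free[j]:
--                 free[j] = False
--                 v = assign(k - 1) + sum(a == b for a, b in zip(students[k - 1], mentors[j]))
--                 free[j] = True
--                 if best is None or v > best:
--                     best = v
--         return best
--
--     return assign(m)
-- ===== Notes on version B (the rewrite author's own statement) =====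
-- stated objective: alternative
-- what changed: B replaces A's bottom-up bitmask dp table with a recursive backtracking search that assigns students one at a time over a boolean free-mentor array (no dp table, no bitmasks, no popcounts); it is exact because the optimal matching is a max over all student-to-mentor bijections, which the search enumerates.
import Mathlib
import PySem

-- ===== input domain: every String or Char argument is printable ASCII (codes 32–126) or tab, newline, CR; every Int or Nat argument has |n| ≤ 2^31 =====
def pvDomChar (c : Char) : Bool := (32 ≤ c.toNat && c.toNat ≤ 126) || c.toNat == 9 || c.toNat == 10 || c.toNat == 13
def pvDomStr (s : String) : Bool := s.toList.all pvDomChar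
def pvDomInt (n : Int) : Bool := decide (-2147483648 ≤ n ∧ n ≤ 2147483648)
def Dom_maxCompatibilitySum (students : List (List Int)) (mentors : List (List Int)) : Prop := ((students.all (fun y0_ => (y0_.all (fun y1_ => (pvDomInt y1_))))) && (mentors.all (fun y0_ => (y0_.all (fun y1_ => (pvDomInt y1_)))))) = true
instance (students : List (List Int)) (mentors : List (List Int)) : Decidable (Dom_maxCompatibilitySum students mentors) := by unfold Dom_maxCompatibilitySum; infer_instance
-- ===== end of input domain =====

-- B replaces A's bottom-up bitmask dp table with a recursive backtracking search that
-- assigns students one at a time over a boolean free-mentor array (objective: alternative).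

-- ===== PORT A =====

-- sum(s == t for s, t in zip(a, b))  (the pair-score comprehension both Pythons use)
def pvScore (a b : List Int) : Int :=
  (a.zip b).foldl (fun acc p => acc + (if p.1 = p.2 then 1 else 0)) 0

-- bin(mask).count('1') in A
def pvPopcount (n : Nat) : Nat :=
  if h : n = 0 then 0 else pvPopcount (n / 2) + n % 2
termination_by n
decreasing_by exact Nat.div_lt_self (Nat.pos_of_ne_zero h) Nat.one_lt_two

def maxCompatibilitySum (students : List (List Int)) (mentors : List (List Int)) : Int :=
  let m := students.length
  let n := 2 ^ m
  let dp0 : List Int := (List.replicate n (-1 : Int)).set 0 0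
  let dp := (List.range n).foldl (fun dp mask =>
    if dp.getD mask (-1) = -1 then dp
    else
      let i := pvPopcount mask
      if m ≤ i then dp
      else
        (List.range m).foldl (fun dp j =>
          if mask.testBit j then dp
          else
            let sc := pvScore (students.getD i []) (mentors.getD j [])
            let nxt := mask ||| (1 <<< j)
            dp.set nxt (max (dp.getD nxt (-1)) (dp.getD mask (-1) + sc))) dp) dp0
  dp.getD (n - 1) (-1)

-- ===== PORT B =====
-- assign(k) of Source B; Python's mutate/restore of `free` is the functional `free.set j false`
-- passed to the recursive call.  Python checks `k == 0`; `assign` is only ever called with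
-- k ≤ m, and the `.getD 0` default matches Python's unreachable `best = None` fall-through.
def pvAssign (st mt : List (List Int)) (m : Nat) : Nat → List Bool → Int
  | 0, _ => 0
  | k + 1, free =>
    ((List.range m).foldl (fun best j =>
      if free.getD j false then
        let v := pvAssign st mt m k (free.set j false)
          + pvScore (st.getD k []) (mt.getD j [])
        match best with
        | none => some v
        | some b => if b < v then some v else some b
      else best) none).getD 0

def maxCompatibilitySum_alt (students : List (List Int)) (mentors : List (List Int)) : Int :=
  pvAssign students mentors students.length students.length
    (List.replicate students.length true)

-- ===== PRECONDITION & SPEC =====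
-- Pre_ excludes exactly the inputs where Python A raises IndexError: at least one student row but
-- fewer mentor rows than student rows (A indexes mentors[j] for every j < len(students)); B's
-- search raises the same IndexError there.
def Pre_maxCompatibilitySum (students : List (List Int)) (mentors : List (List Int)) : Prop :=
  students.length ≤ mentors.length
instance (students : List (List Int)) (mentors : List (List Int)) : Decidable (Pre_maxCompatibilitySum students mentors) := by unfold Pre_maxCompatibilitySum; infer_instance

def pvWitness_maxCompatibilitySum : List (List Int) × List (List Int) :=
  ([[1, 0], [0, 1]], [[1, 1], [0, 1]])

def Spec_maxCompatibilitySum (students : List (List Int)) (mentors : List (List Int)) (out : Int) : Prop := out = maxCompatibilitySum_alt students mentors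
instance (students : List (List Int)) (mentors : List (List Int)) (out : Int) : Decidable (Spec_maxCompatibilitySum students mentors out) := by unfold Spec_maxCompatibilitySum; infer_instance

-- ===== CLAIM (what is proved, stated in full; the proofs are below) =====
def Claim_equal_maxCompatibilitySum : Prop := ∀ (students : List (List Int)) (mentors : List (List Int)), Dom_maxCompatibilitySum students mentors → Pre_maxCompatibilitySum students mentors → Spec_maxCompatibilitySum students mentors (maxCompatibilitySum students mentors)

-- ===== LEMMAS AND PROOFS =====

-- ---------- getD / list helpers ----------
theorem pvGetD_set_self {α : Type} (l : List α) (i : Nat) (v d : α) (h : i < l.length) :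
    (l.set i v).getD i d = v := by
  simp [List.getD_eq_getElem?_getD, h]

theorem pvGetD_set_ne {α : Type} (l : List α) (i j : Nat) (v d : α) (h : i ≠ j) :
    (l.set i v).getD j d = l.getD j d := by
  simp [List.getD_eq_getElem?_getD, List.getElem?_set, h]

-- ---------- bit lemmas ----------
theorem pvXorLt (mask j : Nat) (h : mask.testBit j = true) : mask ^^^ (1 <<< j) < mask := by
  rw [Nat.one_shiftLeft]
  apply Nat.lt_of_testBit j
  · simp [Nat.testBit_xor, h, Nat.testBit_two_pow_self]
  · exact h
  · intro k hk
    simp [Nat.testBit_xor, Nat.testBit_two_pow_of_ne (Nat.ne_of_lt hk)]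

theorem pvXorTestBit (t j : Nat) (h : t.testBit j = true) :
    (t ^^^ (1 <<< j)).testBit j = false := by
  rw [Nat.one_shiftLeft]; simp [Nat.testBit_xor, h, Nat.testBit_two_pow_self]

theorem pvXorTestBit_ne (t j j' : Nat) (h : j ≠ j') :
    (t ^^^ (1 <<< j)).testBit j' = t.testBit j' := by
  rw [Nat.one_shiftLeft]
  simp [Nat.testBit_xor, Nat.testBit_two_pow_of_ne h]

theorem pvXorOrCancel (t j : Nat) (h : t.testBit j = true) :
    (t ^^^ (1 <<< j)) ||| (1 <<< j) = t := by
  rw [Nat.one_shiftLeft]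
  apply Nat.eq_of_testBit_eq
  intro k
  by_cases hk : j = k
  · subst hk; simp [Nat.testBit_or, Nat.testBit_xor, h, Nat.testBit_two_pow_self]
  · simp [Nat.testBit_or, Nat.testBit_xor, Nat.testBit_two_pow_of_ne hk]

theorem pvOrXorCancel (M j : Nat) (h : M.testBit j = false) :
    (M ||| (1 <<< j)) ^^^ (1 <<< j) = M := by
  rw [Nat.one_shiftLeft]
  apply Nat.eq_of_testBit_eq
  intro k
  by_cases hk : j = k
  · subst hk; simp [Nat.testBit_xor, Nat.testBit_or, h, Nat.testBit_two_pow_self]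
  · simp [Nat.testBit_xor, Nat.testBit_or, Nat.testBit_two_pow_of_ne hk]

theorem pvOrTestBit (M j : Nat) : (M ||| (1 <<< j)).testBit j = true := by
  rw [Nat.one_shiftLeft]; simp [Nat.testBit_or, Nat.testBit_two_pow_self]

theorem pvOrNeZero (M j : Nat) : M ||| (1 <<< j) ≠ 0 := by
  intro h0
  have h1 := pvOrTestBit M j
  rw [h0] at h1
  simp [Nat.zero_testBit] at h1

theorem pvOrLt (M j m : Nat) (hM : M < 2 ^ m) (hj : j < m) : M ||| (1 <<< j) < 2 ^ m := by
  rw [Nat.one_shiftLeft]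
  exact Nat.or_lt_two_pow hM (Nat.pow_lt_pow_right (by omega) hj)

theorem pvEqOrOfXor (t j M : Nat) (hb : t.testBit j = true) (hx : t ^^^ (1 <<< j) = M) :
    t = M ||| (1 <<< j) := by
  rw [← hx]; exact (pvXorOrCancel t j hb).symm

-- ---------- popcount lemmas ----------
theorem pvPopcount_step (n : Nat) : pvPopcount n = pvPopcount (n / 2) + n % 2 := by
  by_cases h : n = 0
  · subst h; simp [pvPopcount]
  · rw [pvPopcount]; simp [h]

theorem pvPopcount_countP : ∀ (k n : Nat), n < 2 ^ k → pvPopcount n = (List.range k).countP n.testBit := by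
  intro k
  induction k with
  | zero =>
    intro n hn
    have : n = 0 := by simpa using hn
    subst this; simp [pvPopcount]
  | succ k ih =>
    intro n hn
    rw [pvPopcount_step]
    have h2 : n / 2 < 2 ^ k := by
      have hp : 2 ^ (k + 1) = 2 * 2 ^ k := by ring
      omega
    rw [ih _ h2, List.range_succ_eq_map, List.countP_cons, List.countP_map]
    have hcomp : (n.testBit ∘ Nat.succ) = (n / 2).testBit := by
      funext i; simp [Function.comp, Nat.testBit_add_one]
    rw [hcomp, Nat.testBit_zero]
    rcases Nat.mod_two_eq_zero_or_one n with h | h <;> simp [h] <;> omega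

theorem pvPopcount_eq_zero (n : Nat) (h : pvPopcount n = 0) : n = 0 := by
  induction n using Nat.strong_induction_on with
  | _ n ih =>
    by_cases h0 : n = 0
    · exact h0
    · rw [pvPopcount_step] at h
      have h1 : pvPopcount (n / 2) = 0 := by omega
      have h2 : n % 2 = 0 := by omega
      have h3 : n / 2 = 0 := by
        by_cases hh : n / 2 < n
        · exact ih _ hh h1
        · omega
      omega

theorem pvCountP_flip (l : List Nat) (p q : Nat → Bool) (j : Nat)
    (hpq : ∀ x ∈ l, x ≠ j → p x = q x) (hpj : p j = true) (hqj : q j = false) :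
    l.countP p = l.countP q + l.count j := by
  induction l with
  | nil => simp
  | cons a tl ih =>
    have ih' := ih (fun x hx => hpq x (List.mem_cons_of_mem _ hx))
    by_cases ha : a = j
    · subst ha
      simp [List.countP_cons, List.count_cons, hpj, hqj, ih']
      omega
    · have hx := hpq a List.mem_cons_self ha
      simp [List.countP_cons, List.count_cons, hx, ih', ha]
      omega

theorem pvPopcount_or (M j : Nat) (h : M.testBit j = false) :
    pvPopcount (M ||| (1 <<< j)) = pvPopcount M + 1 := by
  have hOrK : M ||| (1 <<< j) < 2 ^ (M ||| (1 <<< j)) := Nat.lt_two_pow_self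
  have hMK : M < 2 ^ (M ||| (1 <<< j)) := lt_of_le_of_lt Nat.left_le_or hOrK
  have hjK : j < M ||| (1 <<< j) := by
    have h1 : 2 ^ j ≤ M ||| (1 <<< j) := by rw [Nat.one_shiftLeft]; exact Nat.right_le_or
    have h2 : j < 2 ^ j := Nat.lt_two_pow_self
    omega
  rw [pvPopcount_countP _ _ hOrK, pvPopcount_countP _ M hMK]
  have hflip := pvCountP_flip (List.range (M ||| (1 <<< j)))
    (M ||| (1 <<< j)).testBit M.testBit j
    (fun x _ hx => by
      simp [Nat.testBit_or, Nat.one_shiftLeft, Nat.testBit_two_pow_of_ne (fun hh => hx hh.symm)])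
    (pvOrTestBit M j) h
  rw [hflip, List.count_eq_one_of_mem List.nodup_range (List.mem_range.mpr hjK)]

theorem pvPopcount_xor (mask j : Nat) (h : mask.testBit j = true) :
    pvPopcount mask = pvPopcount (mask ^^^ (1 <<< j)) + 1 := by
  have h1 : (mask ^^^ (1 <<< j)).testBit j = false := pvXorTestBit mask j h
  have h2 := pvPopcount_or (mask ^^^ (1 <<< j)) j h1
  rw [pvXorOrCancel mask j h] at h2
  exact h2

theorem pvEq_two_pow_sub_one (mask m : Nat) (h : mask < 2 ^ m) (hpc : m ≤ pvPopcount mask) :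
    mask = 2 ^ m - 1 := by
  rw [pvPopcount_countP m mask h] at hpc
  have hle : (List.range m).countP mask.testBit ≤ m := by
    simpa using (List.countP_le_length (p := mask.testBit) (l := List.range m))
  have hlen : (List.range m).countP mask.testBit = (List.range m).length := by
    rw [List.length_range]; omega
  have hall := List.countP_eq_length.mp hlen
  apply Nat.eq_of_testBit_eq
  intro k
  by_cases hk : k < m
  · rw [hall k (List.mem_range.mpr hk), Nat.testBit_two_pow_sub_one]
    simp [hk]
  · rw [Nat.testBit_lt_two_pow (lt_of_lt_of_le h (Nat.pow_le_pow_right (by omega) (by omega))),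
      Nat.testBit_two_pow_sub_one]
    simp [hk]

theorem pvPopcount_full (m : Nat) : pvPopcount (2 ^ m - 1) = m := by
  have hlt : 2 ^ m - 1 < 2 ^ m := by
    have := Nat.two_pow_pos m
    omega
  rw [pvPopcount_countP m _ hlt]
  have hlen : (List.range m).countP (2 ^ m - 1).testBit = (List.range m).length := by
    apply List.countP_eq_length.mpr
    intro j hj
    rw [Nat.testBit_two_pow_sub_one]
    simpa using List.mem_range.mp hj
  rw [hlen, List.length_range]

theorem pvExistsBit (mask m : Nat) (h : mask < 2 ^ m) (h0 : mask ≠ 0) :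
    ∃ j, j < m ∧ mask.testBit j = true := by
  by_contra hc
  push_neg at hc
  apply h0
  apply Nat.eq_of_testBit_eq
  intro k
  rw [Nat.zero_testBit]
  by_cases hk : k < m
  · simpa using hc k hk
  · exact Nat.testBit_lt_two_pow (lt_of_lt_of_le h (Nat.pow_le_pow_right (by omega) (by omega)))

-- ---------- score lemmas ----------
theorem pvScore_fold_ge (l : List (Int × Int)) : ∀ acc : Int,
    acc ≤ l.foldl (fun a p => a + (if p.1 = p.2 then 1 else 0)) acc := by
  induction l with
  | nil => intro acc; simp
  | cons p tl ih =>
    intro acc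
    have h1 : acc ≤ acc + (if p.1 = p.2 then 1 else 0) := by split <;> omega
    simpa using le_trans h1 (ih _)

theorem pvScore_nonneg (a b : List Int) : 0 ≤ pvScore a b := pvScore_fold_ge _ 0

def pvS (st mt : List (List Int)) (i j : Nat) : Int := pvScore (st.getD i []) (mt.getD j [])

theorem pvS_nonneg (st mt : List (List Int)) (i j : Nat) : 0 ≤ pvS st mt i j := pvScore_nonneg _ _

-- ---------- the reference recursion (max over one-bit-smaller submasks) ----------
def pvF (S : Nat → Nat → Int) (m : Nat) : Nat → List Nat → Int → Int
  | _, [], acc => acc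
  | mask, j :: tl, acc =>
    if h : mask.testBit j then
      pvF S m mask tl (max acc
        ((if mask ^^^ (1 <<< j) = 0 then 0 else pvF S m (mask ^^^ (1 <<< j)) (List.range m) (-1))
          + S (pvPopcount mask - 1) j))
    else pvF S m mask tl acc
termination_by mask js _ => (mask, js.length)
decreasing_by
  · exact Prod.Lex.left _ _ (pvXorLt _ _ h)
  · exact Prod.Lex.right _ (by simp)
  · exact Prod.Lex.right _ (by simp)

def pvBest (S : Nat → Nat → Int) (m : Nat) (mask : Nat) : Int :=
  if mask = 0 then 0 else pvF S m mask (List.range m) (-1)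

def pvTerm (S : Nat → Nat → Int) (m t j : Nat) : Int :=
  pvBest S m (t ^^^ (1 <<< j)) + S (pvPopcount t - 1) j

def pvFoldT (S : Nat → Nat → Int) (m t : Nat) (js : List Nat) (acc : Int) : Int :=
  js.foldl (fun a j => max a (pvTerm S m t j)) acc

theorem pvF_eq_fold (S : Nat → Nat → Int) (m : Nat) (mask : Nat) : ∀ (js : List Nat) (acc : Int),
    pvF S m mask js acc = pvFoldT S m mask (js.filter mask.testBit) acc := by
  intro js
  induction js with
  | nil => intro acc; simp [pvF, pvFoldT]
  | cons j tl ih =>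
    intro acc
    by_cases h : mask.testBit j
    · rw [pvF, dif_pos h, ih, List.filter_cons, if_pos h]
      simp only [pvFoldT, List.foldl_cons]
      rfl
    · rw [pvF, dif_neg h, ih, List.filter_cons, if_neg (by simp [h])]

theorem pvFoldT_acc (S : Nat → Nat → Int) (m t : Nat) : ∀ (js : List Nat) (acc b : Int),
    pvFoldT S m t js (max acc b) = max (pvFoldT S m t js acc) b := by
  intro js
  induction js with
  | nil => intro acc b; simp [pvFoldT]
  | cons j tl ih =>
    intro acc b
    simp only [pvFoldT, List.foldl_cons]
    rw [max_right_comm]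
    exact ih _ _

theorem pvFoldT_ge_acc (S : Nat → Nat → Int) (m t : Nat) : ∀ (js : List Nat) (acc : Int),
    acc ≤ pvFoldT S m t js acc := by
  intro js
  induction js with
  | nil => intro acc; simp [pvFoldT]
  | cons j tl ih =>
    intro acc
    simp only [pvFoldT, List.foldl_cons]
    exact le_trans (le_max_left _ _) (ih _)

theorem pvFoldT_ge_term (S : Nat → Nat → Int) (m t : Nat) (js : List Nat) (j : Nat) (acc : Int)
    (hj : j ∈ js) : pvTerm S m t j ≤ pvFoldT S m t js acc := by
  induction js generalizing acc with
  | nil => simp at hj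
  | cons a tl ih =>
    rcases List.mem_cons.mp hj with rfl | hmem
    · simp only [pvFoldT, List.foldl_cons]
      exact le_trans (le_max_right _ _) (pvFoldT_ge_acc S m t tl _)
    · simp only [pvFoldT, List.foldl_cons]
      exact ih _ hmem

theorem pvBest_nonneg (S : Nat → Nat → Int) (m : Nat) (hS : ∀ i j, 0 ≤ S i j) :
    ∀ mask, mask < 2 ^ m → 0 ≤ pvBest S m mask := by
  intro mask
  induction mask using Nat.strong_induction_on with
  | _ mask ih =>
    intro hlt
    by_cases h0 : mask = 0
    · simp [pvBest, h0]
    · obtain ⟨j, hj, hbit⟩ := pvExistsBit mask m hlt h0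
      rw [pvBest, if_neg h0, pvF_eq_fold]
      have hmem : j ∈ (List.range m).filter mask.testBit := by
        simp [List.mem_filter, List.mem_range, hj, hbit]
      have hsub : mask ^^^ (1 <<< j) < mask := pvXorLt mask j hbit
      have hb : 0 ≤ pvBest S m (mask ^^^ (1 <<< j)) := ih _ hsub (lt_trans hsub hlt)
      have hterm : 0 ≤ pvTerm S m mask j := by
        have hs := hS (pvPopcount mask - 1) j
        unfold pvTerm; omega
      exact le_trans hterm (pvFoldT_ge_term S m mask _ j _ hmem)

theorem pvFoldT_filter_flip (S : Nat → Nat → Int) (m t : Nat) (l : List Nat)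
    (p q : Nat → Bool) (J : Nat) (acc : Int)
    (hnd : l.Nodup) (hmem : J ∈ l) (hpJ : p J = false) (hqJ : q J = true)
    (hagree : ∀ x ∈ l, x ≠ J → q x = p x) :
    pvFoldT S m t (l.filter q) acc = max (pvFoldT S m t (l.filter p) acc) (pvTerm S m t J) := by
  induction l generalizing acc with
  | nil => simp at hmem
  | cons a tl ih =>
    have hnd' := (List.nodup_cons.mp hnd).2
    rcases List.mem_cons.mp hmem with rfl | hmem'
    · have hnotl : J ∉ tl := (List.nodup_cons.mp hnd).1
      have heqf : tl.filter q = tl.filter p := by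
        apply List.filter_congr
        intro x hx
        exact hagree x (List.mem_cons_of_mem _ hx) (fun hxx => hnotl (hxx ▸ hx))
      rw [List.filter_cons, if_pos hqJ, List.filter_cons, if_neg (by simp [hpJ]), heqf]
      simp only [pvFoldT, List.foldl_cons]
      exact pvFoldT_acc S m t _ _ _
    · have hne : a ≠ J := by
        rintro rfl; exact (List.nodup_cons.mp hnd).1 hmem'
      have hqa : q a = p a := hagree a List.mem_cons_self hne
      have hag' : ∀ x ∈ tl, x ≠ J → q x = p x :=
        fun x hx => hagree x (List.mem_cons_of_mem _ hx)
      by_cases hpa : p a = true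
      · rw [List.filter_cons, if_pos (hqa ▸ hpa), List.filter_cons, if_pos hpa]
        simp only [pvFoldT, List.foldl_cons]
        exact ih _ hnd' hmem' hag'
      · rw [List.filter_cons, if_neg (by simp [hqa, hpa]), List.filter_cons, if_neg (by simp [hpa])]
        exact ih _ hnd' hmem' hag'

-- ---------- the invariant value of A's dp array ----------
def pvValC (S : Nat → Nat → Int) (m : Nat) (cond : Nat → Nat → Bool) (t : Nat) : Int :=
  if t = 0 then 0 else pvFoldT S m t ((List.range m).filter (fun j => t.testBit j && cond t j)) (-1)

def pvCondO (K : Nat) : Nat → Nat → Bool := fun t j => decide (t ^^^ (1 <<< j) < K)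

def pvCondI (K J : Nat) : Nat → Nat → Bool := fun t j =>
  decide (t ^^^ (1 <<< j) < K) || (decide (t ^^^ (1 <<< j) = K) && decide (j < J))

theorem pvValC_congr (S : Nat → Nat → Int) (m : Nat) (c1 c2 : Nat → Nat → Bool) (t : Nat)
    (h : ∀ j, j < m → t.testBit j = true → c1 t j = c2 t j) :
    pvValC S m c1 t = pvValC S m c2 t := by
  unfold pvValC
  split
  · rfl
  · rw [List.filter_congr]
    intro j hj
    by_cases hb : t.testBit j
    · simp [hb, h j (List.mem_range.mp hj) hb]
    · simp [hb]

theorem pvValC_self_best (S : Nat → Nat → Int) (m : Nat) (cond : Nat → Nat → Bool) (K : Nat)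
    (hc : ∀ j, j < m → K.testBit j = true → cond K j = true) :
    pvValC S m cond K = pvBest S m K := by
  unfold pvValC pvBest
  split
  · rfl
  · rw [pvF_eq_fold]
    congr 1
    apply List.filter_congr
    intro j hj
    by_cases hb : K.testBit j
    · simp [hb, hc j (List.mem_range.mp hj) hb]
    · simp [hb]

-- ---------- A's port as a named fold (definitionally equal to the port) ----------
def pvAInner (st mt : List (List Int)) (K : Nat) (dp : List Int) (j : Nat) : List Int :=
  if K.testBit j then dp
  else dp.set (K ||| (1 <<< j))
    (max (dp.getD (K ||| (1 <<< j)) (-1))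
         (dp.getD K (-1) + pvScore (st.getD (pvPopcount K) []) (mt.getD j [])))

def pvABody (st mt : List (List Int)) (dp : List Int) (K : Nat) : List Int :=
  if dp.getD K (-1) = -1 then dp
  else if st.length ≤ pvPopcount K then dp
  else (List.range st.length).foldl (pvAInner st mt K) dp

theorem pvA_eq_mirror (st mt : List (List Int)) :
    maxCompatibilitySum st mt =
      ((List.range (2 ^ st.length)).foldl (pvABody st mt)
        ((List.replicate (2 ^ st.length) (-1 : Int)).set 0 0)).getD (2 ^ st.length - 1) (-1) := rfl

theorem pvAInner_step (st mt : List (List Int)) (K J : Nat)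
    (hK : K < 2 ^ st.length) (hJ : J < st.length)
    (dp : List Int) (hlen : dp.length = 2 ^ st.length)
    (hval : ∀ t, t < 2 ^ st.length →
      dp.getD t (-1) = pvValC (pvS st mt) st.length (pvCondI K J) t) :
    (pvAInner st mt K dp J).length = 2 ^ st.length ∧
      ∀ t, t < 2 ^ st.length →
        (pvAInner st mt K dp J).getD t (-1) = pvValC (pvS st mt) st.length (pvCondI K (J + 1)) t := by
  by_cases hb : K.testBit J
  · rw [pvAInner, if_pos hb]
    refine ⟨hlen, ?_⟩
    intro t ht
    rw [hval t ht]
    apply pvValC_congr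
    intro j hj hbit
    simp only [pvCondI]
    by_cases hx : t ^^^ (1 <<< j) = K
    · by_cases hjJ : j = J
      · subst hjJ
        exfalso
        have h1 : (t ^^^ (1 <<< j)).testBit j = false := pvXorTestBit t j hbit
        rw [hx] at h1
        simp [h1] at hb
      · have hiff : (j < J) ↔ (j < J + 1) := by omega
        simp [hx, hiff]
    · simp [hx]
  · rw [pvAInner, if_neg hb]
    have hbf : K.testBit J = false := by simpa using hb
    have hnxtlt : K ||| (1 <<< J) < 2 ^ st.length := pvOrLt K J st.length hK hJ
    have hnxt0 : K ||| (1 <<< J) ≠ 0 := pvOrNeZero K J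
    have hnxtb : (K ||| (1 <<< J)).testBit J = true := pvOrTestBit K J
    have hxback : (K ||| (1 <<< J)) ^^^ (1 <<< J) = K := pvOrXorCancel K J hbf
    have hdpK : dp.getD K (-1) = pvBest (pvS st mt) st.length K := by
      rw [hval K hK]
      apply pvValC_self_best
      intro j hj hbit
      simp only [pvCondI, Bool.or_eq_true, decide_eq_true_eq]
      exact Or.inl (pvXorLt K j hbit)
    refine ⟨by simp [hlen], ?_⟩
    intro t ht
    by_cases hteq : t = K ||| (1 <<< J)
    · subst hteq
      rw [pvGetD_set_self _ _ _ _ (by omega)]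
      rw [hval _ hnxtlt, hdpK]
      have hflip := pvFoldT_filter_flip (pvS st mt) st.length (K ||| (1 <<< J)) (List.range st.length)
        (fun j => (K ||| (1 <<< J)).testBit j && pvCondI K J (K ||| (1 <<< J)) j)
        (fun j => (K ||| (1 <<< J)).testBit j && pvCondI K (J + 1) (K ||| (1 <<< J)) j)
        J (-1) List.nodup_range (List.mem_range.mpr hJ)
        (by simp [pvCondI, hxback])
        (by simp [pvCondI, hxback, hnxtb])
        ?_
      · rw [pvValC, if_neg hnxt0, pvValC, if_neg hnxt0, hflip]
        have hterm : pvTerm (pvS st mt) st.length (K ||| (1 <<< J)) J =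
            pvBest (pvS st mt) st.length K
              + pvScore (st.getD (pvPopcount K) []) (mt.getD J []) := by
          rw [pvTerm, hxback, pvPopcount_or K J hbf]
          rfl
        rw [hterm, max_comm]
      · intro x hx hne
        by_cases hbx : (K ||| (1 <<< J)).testBit x
        · have hx2 : (K ||| (1 <<< J)) ^^^ (1 <<< x) ≠ K := by
            intro heq
            have h2 : ((K ||| (1 <<< J)) ^^^ (1 <<< x)).testBit x = false := pvXorTestBit _ x hbx
            rw [heq] at h2
            have h4 : (K.testBit x || ((1 : Nat) <<< J).testBit x) = true := by
              rw [← Nat.testBit_or]; exact hbx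
            rw [h2, Bool.false_or, Nat.one_shiftLeft] at h4
            by_cases hJx : J = x
            · exact hne hJx.symm
            · rw [Nat.testBit_two_pow_of_ne hJx] at h4
              simp at h4
          simp only [pvCondI, hbx, Bool.true_and]
          simp [hx2]
        · simp [hbx]
    · rw [pvGetD_set_ne _ _ _ _ _ (fun h => hteq h.symm), hval t ht]
      apply pvValC_congr
      intro j hj hbit
      simp only [pvCondI]
      by_cases hx : t ^^^ (1 <<< j) = K
      · by_cases hjJ : j = J
        · subst hjJ
          exact absurd (pvEqOrOfXor t j K hbit hx) hteq
        · have hiff : (j < J) ↔ (j < J + 1) := by omega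
          simp [hx, hiff]
      · simp [hx]

theorem pvAInner_loop (st mt : List (List Int)) (K : Nat)
    (hK : K < 2 ^ st.length)
    (dp : List Int) (hlen : dp.length = 2 ^ st.length)
    (hval : ∀ t, t < 2 ^ st.length →
      dp.getD t (-1) = pvValC (pvS st mt) st.length (pvCondI K 0) t) :
    ∀ J, J ≤ st.length →
      ((List.range J).foldl (pvAInner st mt K) dp).length = 2 ^ st.length ∧
      ∀ t, t < 2 ^ st.length →
        ((List.range J).foldl (pvAInner st mt K) dp).getD t (-1)
          = pvValC (pvS st mt) st.length (pvCondI K J) t := by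
  intro J
  induction J with
  | zero => intro _; exact ⟨hlen, hval⟩
  | succ J ih =>
    intro hJ
    obtain ⟨hlen', hval'⟩ := ih (by omega)
    rw [List.range_succ, List.foldl_append, List.foldl_cons, List.foldl_nil]
    exact pvAInner_step st mt K J hK (by omega) _ hlen' hval'

theorem pvAOuter_step (st mt : List (List Int)) (K : Nat) (hK : K < 2 ^ st.length)
    (dp : List Int) (hlen : dp.length = 2 ^ st.length)
    (hval : ∀ t, t < 2 ^ st.length →
      dp.getD t (-1) = pvValC (pvS st mt) st.length (pvCondO K) t) :
    (pvABody st mt dp K).length = 2 ^ st.length ∧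
      ∀ t, t < 2 ^ st.length →
        (pvABody st mt dp K).getD t (-1) = pvValC (pvS st mt) st.length (pvCondO (K + 1)) t := by
  have hdpK : dp.getD K (-1) = pvBest (pvS st mt) st.length K := by
    rw [hval K hK]
    apply pvValC_self_best
    intro j hj hbit
    simp only [pvCondO, decide_eq_true_eq]
    exact pvXorLt K j hbit
  have hnn := pvBest_nonneg (pvS st mt) st.length (pvS_nonneg st mt) K hK
  rw [pvABody, hdpK, if_neg (by omega)]
  by_cases hguard : st.length ≤ pvPopcount K
  · rw [if_pos hguard]
    refine ⟨hlen, ?_⟩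
    intro t ht
    rw [hval t ht]
    apply pvValC_congr
    intro j hj hbit
    simp only [pvCondO]
    have hKfull : K = 2 ^ st.length - 1 := pvEq_two_pow_sub_one K _ hK hguard
    by_cases hx : t ^^^ (1 <<< j) = K
    · exfalso
      have h1 : (t ^^^ (1 <<< j)).testBit j = false := pvXorTestBit t j hbit
      rw [hx, hKfull, Nat.testBit_two_pow_sub_one] at h1
      simp [hj] at h1
    · have hiff : (t ^^^ (1 <<< j) < K) ↔ (t ^^^ (1 <<< j) < K + 1) := by omega
      simp [hiff]
  · rw [if_neg hguard]
    have hval0 : ∀ t, t < 2 ^ st.length →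
        dp.getD t (-1) = pvValC (pvS st mt) st.length (pvCondI K 0) t := by
      intro t ht
      rw [hval t ht]
      apply pvValC_congr
      intro j hj hbit
      simp [pvCondO, pvCondI]
    obtain ⟨hlen', hval'⟩ := pvAInner_loop st mt K hK dp hlen hval0 st.length le_rfl
    refine ⟨hlen', ?_⟩
    intro t ht
    rw [hval' t ht]
    apply pvValC_congr
    intro j hj hbit
    simp only [pvCondI, pvCondO]
    by_cases hx : t ^^^ (1 <<< j) = K
    · have h1 : K < K + 1 := by omega
      simp [hx, hj, h1]
    · have hiff : (t ^^^ (1 <<< j) < K) ↔ (t ^^^ (1 <<< j) < K + 1) := by omega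
      simp [hx, hiff]

theorem pvAOuter_loop (st mt : List (List Int)) : ∀ K, K ≤ 2 ^ st.length →
    (((List.range K).foldl (pvABody st mt)
        ((List.replicate (2 ^ st.length) (-1 : Int)).set 0 0)).length = 2 ^ st.length) ∧
    ∀ t, t < 2 ^ st.length →
      ((List.range K).foldl (pvABody st mt)
        ((List.replicate (2 ^ st.length) (-1 : Int)).set 0 0)).getD t (-1)
        = pvValC (pvS st mt) st.length (pvCondO K) t := by
  intro K
  induction K with
  | zero =>
    intro _
    constructor
    · rw [List.range_zero, List.foldl_nil]
      simp
    · intro t ht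
      rw [List.range_zero, List.foldl_nil]
      by_cases h0 : t = 0
      · subst h0
        rw [pvGetD_set_self _ _ _ _ (by simpa using ht)]
        simp [pvValC]
      · rw [pvGetD_set_ne _ _ _ _ _ (fun h => h0 h.symm), List.getD_replicate _ ht]
        rw [pvValC, if_neg h0]
        have hnil : (List.range st.length).filter
            (fun j => t.testBit j && pvCondO 0 t j) = [] := by
          apply List.filter_eq_nil_iff.mpr
          intro j _
          simp [pvCondO]
        rw [hnil]
        simp [pvFoldT]
  | succ K ih =>
    intro hK
    obtain ⟨hlen, hval⟩ := ih (by omega)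
    rw [List.range_succ, List.foldl_append, List.foldl_cons, List.foldl_nil]
    exact pvAOuter_step st mt K (by omega) _ hlen hval

theorem pvA_eq_pvBest (st mt : List (List Int)) :
    maxCompatibilitySum st mt = pvBest (pvS st mt) st.length (2 ^ st.length - 1) := by
  have hpos : 0 < 2 ^ st.length := Nat.two_pow_pos st.length
  obtain ⟨hlen, hval⟩ := pvAOuter_loop st mt (2 ^ st.length) le_rfl
  rw [pvA_eq_mirror st mt, hval (2 ^ st.length - 1) (by omega)]
  apply pvValC_self_best
  intro j hj hbit
  simp only [pvCondO, decide_eq_true_eq]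
  have := pvXorLt (2 ^ st.length - 1) j hbit
  omega

-- ---------- B's backtracking recursion equals pvBest ----------
-- abstract form of B's inner option fold
def pvOStep (tb : Nat → Bool) (v : Nat → Int) (best : Option Int) (j : Nat) : Option Int :=
  if tb j then
    match best with
    | none => some (v j)
    | some b => if b < v j then some (v j) else some b
  else best

theorem pvOFold_some (tb : Nat → Bool) (v : Nat → Int) : ∀ (js : List Nat) (b : Int),
    js.foldl (pvOStep tb v) (some b)
      = some (js.foldl (fun a j => if tb j then max a (v j) else a) b) := by
  intro js
  induction js with
  | nil => intro b; rfl
  | cons j tl ih =>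
    intro b
    by_cases h : tb j
    · have h1 : pvOStep tb v (some b) j = some (if b < v j then v j else b) := by
        simp only [pvOStep, if_pos h]
        split <;> rfl
      have hm : (if b < v j then v j else b) = max b (v j) := by
        rcases lt_or_ge b (v j) with hc | hc
        · rw [if_pos hc, max_eq_right hc.le]
        · rw [if_neg (by omega), max_eq_left hc]
      rw [List.foldl_cons, h1, hm, ih, List.foldl_cons, if_pos h]
    · rw [List.foldl_cons, List.foldl_cons]
      have h1 : pvOStep tb v (some b) j = some b := by simp [pvOStep, h]
      rw [h1, if_neg h]
      exact ih b

theorem pvOFold_none (tb : Nat → Bool) (v : Nat → Int) : ∀ (js : List Nat),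
    (∀ j ∈ js, tb j = true → 0 ≤ v j) → (∃ j ∈ js, tb j = true) →
    (js.foldl (pvOStep tb v) none).getD 0
      = js.foldl (fun a j => if tb j then max a (v j) else a) (-1) := by
  intro js
  induction js with
  | nil => intro _ hex; simp at hex
  | cons j tl ih =>
    intro hnn hex
    by_cases h : tb j
    · have h1 : pvOStep tb v none j = some (v j) := by simp [pvOStep, h]
      rw [List.foldl_cons, h1, pvOFold_some, Option.getD_some, List.foldl_cons]
      have h0 := hnn j List.mem_cons_self h
      have hacc : (if tb j then max (-1 : Int) (v j) else (-1)) = v j := by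
        rw [if_pos h, max_eq_right (by omega)]
      rw [hacc]
    · have h1 : pvOStep tb v none j = none := by simp [pvOStep, h]
      rw [List.foldl_cons, h1, List.foldl_cons, if_neg h]
      apply ih (fun x hx => hnn x (List.mem_cons_of_mem _ hx))
      obtain ⟨j', hj', hb'⟩ := hex
      rcases List.mem_cons.mp hj' with rfl | hmem
      · exact absurd hb' h
      · exact ⟨j', hmem, hb'⟩

theorem pvOFold_congr (tb : Nat → Bool) (v1 v2 : Nat → Int) : ∀ (js : List Nat),
    (∀ j ∈ js, tb j = true → v1 j = v2 j) → ∀ (acc : Option Int),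
    js.foldl (pvOStep tb v1) acc = js.foldl (pvOStep tb v2) acc := by
  intro js
  induction js with
  | nil => intro _ acc; rfl
  | cons j tl ih =>
    intro h acc
    rw [List.foldl_cons, List.foldl_cons]
    have hstep : pvOStep tb v1 acc j = pvOStep tb v2 acc j := by
      by_cases hb : tb j
      · simp [pvOStep, hb, h j List.mem_cons_self hb]
      · simp [pvOStep, hb]
    rw [hstep]
    exact ih (fun x hx => h x (List.mem_cons_of_mem _ hx)) _

theorem pvIFold_eq_foldT (S : Nat → Nat → Int) (m t : Nat) (tb : Nat → Bool) (js : List Nat) :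
    js.foldl (fun a j => if tb j then max a (pvTerm S m t j) else a) (-1)
      = pvFoldT S m t (js.filter tb) (-1) := by
  rw [pvFoldT, List.foldl_filter]

-- B's inner fold is the abstract option fold (definitional)
theorem pvAssign_succ (st mt : List (List Int)) (m k : Nat) (free : List Bool) :
    pvAssign st mt m (k + 1) free =
      ((List.range m).foldl (pvOStep (fun j => free.getD j false)
        (fun j => pvAssign st mt m k (free.set j false)
          + pvScore (st.getD k []) (mt.getD j []))) none).getD 0 := rfl

-- the main bridge: the backtracking value at a free-set encoding of `mask` is pvBest at `mask`
theorem pvAssign_eq_best (st mt : List (List Int)) (m : Nat) :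
    ∀ (k : Nat) (free : List Bool) (mask : Nat),
      free.length = m → mask < 2 ^ m → pvPopcount mask = k →
      (∀ j, j < m → free.getD j false = mask.testBit j) →
      pvAssign st mt m k free = pvBest (pvS st mt) m mask := by
  intro k
  induction k with
  | zero =>
    intro free mask _ _ hpc _
    have h0 : mask = 0 := pvPopcount_eq_zero mask hpc
    subst h0
    simp [pvAssign, pvBest]
  | succ k ih =>
    intro free mask hlen hlt hpc henc
    have h0 : mask ≠ 0 := by
      intro h; subst h; simp [pvPopcount] at hpc
    rw [pvAssign_succ]
    have hcongr : ∀ j ∈ List.range m, (fun j => free.getD j false) j = true →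
        (pvAssign st mt m k (free.set j false)
          + pvScore (st.getD k []) (mt.getD j []))
        = pvTerm (pvS st mt) m mask j := by
      intro j hj hb
      have hjm : j < m := List.mem_range.mp hj
      have hbit : mask.testBit j = true := (henc j hjm) ▸ hb
      have hsub : mask ^^^ (1 <<< j) < mask := pvXorLt mask j hbit
      have hpc' : pvPopcount (mask ^^^ (1 <<< j)) = k := by
        have := pvPopcount_xor mask j hbit
        omega
      have henc' : ∀ j', j' < m → (free.set j false).getD j' false
          = (mask ^^^ (1 <<< j)).testBit j' := by
        intro j' hj'
        by_cases he : j' = j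
        · subst he
          rw [pvGetD_set_self _ _ _ _ (by omega), pvXorTestBit mask j' hbit]
        · rw [pvGetD_set_ne _ _ _ _ _ (fun h => he h.symm), henc j' hj',
            pvXorTestBit_ne mask j j' (fun h => he h.symm)]
      have hIH := ih (free.set j false) (mask ^^^ (1 <<< j))
        (by simp [hlen]) (by omega) hpc' henc'
      rw [hIH, pvTerm]
      have hk : pvPopcount mask - 1 = k := by omega
      rw [hk]
      rfl
    rw [pvOFold_congr _ _ (fun j => pvTerm (pvS st mt) m mask j) _ hcongr none]
    have hex : ∃ j ∈ List.range m, (fun j => free.getD j false) j = true := by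
      obtain ⟨j, hj, hbit⟩ := pvExistsBit mask m hlt h0
      exact ⟨j, List.mem_range.mpr hj, by simpa using (henc j hj).trans hbit⟩
    have hnn : ∀ j ∈ List.range m, (fun j => free.getD j false) j = true →
        0 ≤ pvTerm (pvS st mt) m mask j := by
      intro j hj hb
      have hjm : j < m := List.mem_range.mp hj
      have hbit : mask.testBit j = true := (henc j hjm) ▸ hb
      have hsub := pvXorLt mask j hbit
      have h1 := pvBest_nonneg (pvS st mt) m (pvS_nonneg st mt) (mask ^^^ (1 <<< j)) (by omega)
      have h2 := pvS_nonneg st mt (pvPopcount mask - 1) j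
      unfold pvTerm
      omega
    rw [pvOFold_none _ _ _ hnn hex, pvIFold_eq_foldT]
    have hfilt : (List.range m).filter (fun j => free.getD j false)
        = (List.range m).filter mask.testBit := by
      apply List.filter_congr
      intro j hj
      rw [henc j (List.mem_range.mp hj)]
    rw [hfilt, pvBest, if_neg h0, pvF_eq_fold]

theorem pvB_eq_pvBest (st mt : List (List Int)) :
    maxCompatibilitySum_alt st mt = pvBest (pvS st mt) st.length (2 ^ st.length - 1) := by
  have hpos : 0 < 2 ^ st.length := Nat.two_pow_pos st.length
  apply pvAssign_eq_best
  · simp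
  · omega
  · exact pvPopcount_full st.length
  · intro j hj
    rw [List.getD_replicate _ hj, Nat.testBit_two_pow_sub_one]
    simp [hj]

-- ===== VERDICT (by name: the statement is the Claim_ definition above) =====
theorem maxCompatibilitySum_spec : Claim_equal_maxCompatibilitySum := by
  intro students mentors _ _
  unfold Spec_maxCompatibilitySum
  rw [pvA_eq_pvBest, pvB_eq_pvBest]
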